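-- pv_equiv track=rewrite | github.com/dMedinaO/hydrophobinsIdentification | scripts/searchClassI.py | searchDobleEnlaces
-- ===== SOURCE A (Python) =====
-- def searchDobleEnlaces(sequence):
--
--     cont=0
--     for i in range(len(sequence)-1):
--         if sequence[i] == 'C' and sequence[i+1] == 'C':
--             cont+=1
--     if cont>=2:
--         return 0#cumple con la cantidad minima
--     else:
--         return 1#no cumple con la cantidad minima
-- ===== SOURCE B (Python) =====
-- def searchDobleEnlaces(sequence):
--     # run-length pass: a maximal run of L consecutive 'C's contains L-1 adjacent CC pairs
--     total = 0
--     run = 0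
--     for ch in sequence:
--         if ch == 'C':
--             run += 1
--         else:
--             if run:
--                 total += run - 1
--             run = 0
--     if run:
--         total += run - 1
--     return 0 if total >= 2 else 1
-- ===== Notes on version B (the rewrite author's own statement) =====
-- stated objective: alternative
-- what changed: B replaces A's index loop over range(len-1) with pairwise lookups sequence[i],sequence[i+1] by a single value-iteration run-length scan: it tracks the length of the current run of 'C's and adds run-1 pairs when a run ends.
import Mathlib
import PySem

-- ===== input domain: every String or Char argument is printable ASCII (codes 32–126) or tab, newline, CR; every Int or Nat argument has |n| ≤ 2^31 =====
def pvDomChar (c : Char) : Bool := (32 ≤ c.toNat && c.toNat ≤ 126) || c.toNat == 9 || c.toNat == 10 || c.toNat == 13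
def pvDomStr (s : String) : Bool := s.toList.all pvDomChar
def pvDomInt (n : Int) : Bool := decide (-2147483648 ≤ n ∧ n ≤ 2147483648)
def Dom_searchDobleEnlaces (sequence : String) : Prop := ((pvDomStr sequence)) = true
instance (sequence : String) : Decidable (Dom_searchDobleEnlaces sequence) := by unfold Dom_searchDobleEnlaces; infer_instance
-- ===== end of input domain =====

-- B replaces A's index loop with pairwise lookups by a single value-iteration run-length scan (alternative decomposition, same cost).

-- ===== PORT A =====
-- cont = 0; for i in range(len(sequence)-1): if sequence[i]=='C' and sequence[i+1]=='C': cont+=1; return 0 if cont>=2 else 1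
def searchDobleEnlaces (sequence : String) : Int :=
  let cont : Int :=
    (PySem.List.pyRange 0 (PySem.Str.len sequence - 1) 1).foldl
      (fun acc i =>
        if PySem.List.pyGetD sequence.toList i ' ' = 'C' ∧
           PySem.List.pyGetD sequence.toList (i + 1) ' ' = 'C'
        then acc + 1 else acc) 0
  if cont ≥ 2 then 0 else 1

-- ===== PORT B =====
-- one step of B's loop body over the characters themselves: state = (total, run)
def sdeStep (s : Int × Int) (ch : Char) : Int × Int :=
  if ch = 'C' then (s.1, s.2 + 1)
  else (if s.2 ≠ 0 then s.1 + s.2 - 1 else s.1, 0)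

def searchDobleEnlaces_alt (sequence : String) : Int :=
  let s := sequence.toList.foldl sdeStep (0, 0)
  let total := if s.2 ≠ 0 then s.1 + s.2 - 1 else s.1
  if total ≥ 2 then 0 else 1

-- ===== PRECONDITION & SPEC =====
def Spec_searchDobleEnlaces (sequence : String) (out : Int) : Prop := out = searchDobleEnlaces_alt sequence
instance (sequence : String) (out : Int) : Decidable (Spec_searchDobleEnlaces sequence out) := by unfold Spec_searchDobleEnlaces; infer_instance

-- ===== CLAIM (what is proved, stated in full; the proofs are below) =====
def Claim_equal_searchDobleEnlaces : Prop := ∀ (sequence : String), Dom_searchDobleEnlaces sequence → Spec_searchDobleEnlaces sequence (searchDobleEnlaces sequence)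

-- ===== LEMMAS AND PROOFS =====

-- number of adjacent CC pairs: the common characterisation both loops are reduced to
def countAdj : List Char → Int
  | a :: b :: t => (if a = 'C' ∧ b = 'C' then 1 else 0) + countAdj (b :: t)
  | _ => 0

-- the final flush of B's pending run, as applied to the loop state
def sdeFin (s : Int × Int) : Int := if s.2 ≠ 0 then s.1 + s.2 - 1 else s.1

-- B's run-length loop invariant: with a pending run of r 'C's, the flushed total is
-- the accumulated total, plus r-1 pairs inside the pending run, plus countAdj of the rest,
-- plus one boundary pair if the pending run continues into the rest.
theorem loopB (cs : List Char) (t : Int) (r : Nat) :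
    sdeFin (cs.foldl sdeStep (t, (r : Int))) =
      t + (if r = 0 then 0 else (r : Int) - 1) + countAdj cs +
        (if r ≠ 0 ∧ cs.head? = some 'C' then 1 else 0) := by
  induction cs generalizing t r with
  | nil =>
    have c0 : countAdj [] = 0 := rfl
    rcases Nat.eq_zero_or_pos r with h | h
    · subst h; simp [sdeFin, c0]
    · have h1 : (r : Int) ≠ 0 := by omega
      have h2 : ¬ r = 0 := by omega
      simp [sdeFin, c0, h2]
      ring
  | cons c rest ih =>
    rw [List.foldl_cons]
    by_cases hc : c = 'C'
    · subst hc
      have h1 : sdeStep (t, (r : Int)) 'C' = (t, ((r + 1 : Nat) : Int)) := by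
        simp only [sdeStep]; push_cast; rfl
      rw [h1, ih]
      have hp1 : ¬ (r + 1 = 0) := by omega
      cases rest with
      | nil =>
        have c0 : countAdj ['C'] = 0 := rfl
        have c1 : countAdj [] = 0 := rfl
        rcases Nat.eq_zero_or_pos r with h | h
        · subst h; simp [c0, c1, hp1]
        · have h2 : ¬ r = 0 := by omega
          simp [c0, c1, h2]
          try push_cast
          try ring
      | cons b rest' =>
        by_cases hb : b = 'C'
        · subst hb
          have cC : countAdj ('C' :: 'C' :: rest') = 1 + countAdj ('C' :: rest') := by
            simp [countAdj]
          rw [cC]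
          rcases Nat.eq_zero_or_pos r with h | h
          · subst h; simp [hp1]; ring
          · have h2 : ¬ r = 0 := by omega
            simp [h2]
            ring
        · have cC : countAdj ('C' :: b :: rest') = countAdj (b :: rest') := by
            simp [countAdj, hb]
          rw [cC]
          rcases Nat.eq_zero_or_pos r with h | h
          · subst h; simp [hp1, hb]
          · have h2 : ¬ r = 0 := by omega
            simp [h2, hb]
            ring
    · have h1 : sdeStep (t, (r : Int)) c =
          (t + (if r = 0 then 0 else (r : Int) - 1), ((0 : Nat) : Int)) := by
        rcases Nat.eq_zero_or_pos r with h | h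
        · subst h; simp [sdeStep, hc]
        · have h2 : ¬ r = 0 := by omega
          simp [sdeStep, hc, h2]
          ring
      rw [h1, ih]
      cases rest with
      | nil => simp [countAdj, hc]
      | cons b rest' =>
        have cC : countAdj (c :: b :: rest') = countAdj (b :: rest') := by
          have : ¬ (c = 'C' ∧ b = 'C') := by tauto
          simp [countAdj, this]
        rw [cC]
        simp [hc]

-- A's loop, restated over Nat indices, computes countAdj
theorem loopA_nat (cs : List Char) (acc : Int) :
    (List.range (cs.length - 1)).foldl
      (fun acc k => if cs.getD k ' ' = 'C' ∧ cs.getD (k + 1) ' ' = 'C' then acc + 1 else acc)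
      acc = acc + countAdj cs := by
  induction cs generalizing acc with
  | nil => simp [countAdj]
  | cons a rest ih =>
    cases rest with
    | nil => simp [countAdj]
    | cons b t =>
      have hlen : (a :: b :: t).length - 1 = t.length + 1 := by simp
      rw [hlen, List.range_succ_eq_map, List.foldl_cons, List.foldl_map]
      simp only [List.getD_cons_zero, List.getD_cons_succ]
      have ih2 := ih (if a = 'C' ∧ b = 'C' then acc + 1 else acc)
      simp only [List.length_cons, Nat.add_sub_cancel, List.getD_cons_succ] at ih2
      rw [ih2]
      have cC : countAdj (a :: b :: t) = (if a = 'C' ∧ b = 'C' then 1 else 0) + countAdj (b :: t) := rfl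
      rw [cC]
      split_ifs <;> ring

-- A's loop as written (pyRange over Int indices) computes countAdj
theorem loopA (cs : List Char) (acc : Int) :
    (PySem.List.pyRange 0 ((cs.length : Int) - 1) 1).foldl
      (fun acc i =>
        if PySem.List.pyGetD cs i ' ' = 'C' ∧ PySem.List.pyGetD cs (i + 1) ' ' = 'C'
        then acc + 1 else acc) acc = acc + countAdj cs := by
  rw [PySem.List.pyRange_one, List.foldl_map]
  have h1 : (((cs.length : Int) - 1) - 0).toNat = cs.length - 1 := by omega
  rw [h1]
  have hf : (fun (acc : Int) (k : Nat) =>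
      if PySem.List.pyGetD cs ((0 : Int) + (k : Int)) ' ' = 'C' ∧
         PySem.List.pyGetD cs ((0 : Int) + (k : Int) + 1) ' ' = 'C'
      then acc + 1 else acc) =
      (fun (acc : Int) (k : Nat) =>
      if cs.getD k ' ' = 'C' ∧ cs.getD (k + 1) ' ' = 'C' then acc + 1 else acc) := by
    funext acc k
    have e1 : (0 : Int) + (k : Int) = ((k : Nat) : Int) := by omega
    have e2 : ((k : Int) + 1 : Int) = ((k + 1 : Nat) : Int) := by omega
    rw [e1, e2, PySem.List.pyGetD_natCast, PySem.List.pyGetD_natCast]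
  rw [hf]
  exact loopA_nat cs acc

-- ===== VERDICT (by name: the statement is the Claim_ definition above) =====
theorem searchDobleEnlaces_spec : Claim_equal_searchDobleEnlaces := by
  intro s _
  unfold Spec_searchDobleEnlaces searchDobleEnlaces searchDobleEnlaces_alt
  have hA := loopA s.toList 0
  have hB := loopB s.toList 0 0
  simp [PySem.Str.len_eq] at hA ⊢
  rw [hA]
  simp [sdeFin] at hB
  rw [hB]
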